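-- pv_equiv track=rewrite | github.com/Denigmma/Practice_LogBook | Yandex/Я профессионал (olimp)/2024-2025/Прог и инф тех/Финал/task8.py | countDigitAll
-- ===== SOURCE A (Python) =====
-- def countDigitAll(d,n):
-- 	if n<0:
-- 		return 0
-- 	count=0
-- 	position=1
-- 	while position<=n:
-- 		left=n//(position*10)
-- 		digit=(n//position)%10
-- 		right=n%position
-- 		if digit > d:
-- 			count += (left + 1) * position
-- 		elif digit == d:
-- 			count += left * position + right + 1
-- 		else:
-- 			count += left * position
-- 		if d == 0:
-- 			count -= position
-- 		position *= 10
-- 	return count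
-- ===== SOURCE B (Python) =====
-- def countDigitAll(d, n):
--     def digits_count(x):
--         c = 0
--         while x > 0:
--             if x % 10 == d:
--                 c += 1
--             x //= 10
--         return c
--
--     def f(m):
--         if m <= 0:
--             return 0
--         q, r = divmod(m, 10)
--         last = q + (1 if r >= d else 0) - (1 if d == 0 else 0)
--         return last + 10 * f(q) - (9 - r) * digits_count(q)
--
--     return f(n)
-- ===== Notes on version B (the rewrite author's own statement) =====
-- stated objective: alternative
-- what changed: Replaces A's bottom-up per-position closed-form loop with a top-down self-similar recursion on n // 10 (units-place count plus 10 times the count for 1..n//10, corrected on the digit positions of n//10 by the truncated last block), exactly equivalent for all inputs.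
import Mathlib
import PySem

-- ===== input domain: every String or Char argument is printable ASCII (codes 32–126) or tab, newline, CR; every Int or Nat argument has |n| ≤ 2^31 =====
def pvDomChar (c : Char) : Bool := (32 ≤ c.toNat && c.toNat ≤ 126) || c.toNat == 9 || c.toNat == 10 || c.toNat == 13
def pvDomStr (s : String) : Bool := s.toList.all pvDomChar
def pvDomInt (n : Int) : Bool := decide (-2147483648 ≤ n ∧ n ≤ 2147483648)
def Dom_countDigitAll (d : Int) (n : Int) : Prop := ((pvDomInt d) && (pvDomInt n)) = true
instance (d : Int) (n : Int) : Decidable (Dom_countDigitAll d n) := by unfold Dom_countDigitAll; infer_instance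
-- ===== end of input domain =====

-- B computes the same counts by a top-down recursion on n // 10 instead of A's bottom-up per-position loop (alternative algorithm, same results).


-- ===== PORT A =====
-- A's while loop: position runs over 1, 10, 100, … while position ≤ n; the 1 ≤ position
-- invariant is carried as a hypothesis argument only to justify termination.
def countDigitAllLoop (d n : Int) (position : Int) (hpos : 1 ≤ position) (count : Int) : Int :=
  if h : position ≤ n then
    let left := PySem.Int.floordiv n (position * 10)
    let digit := PySem.Int.mod (PySem.Int.floordiv n position) 10
    let right := PySem.Int.mod n position
    let count1 :=
      if digit > d then count + (left + 1) * position
      else if digit = d then count + left * position + right + 1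
      else count + left * position
    let count2 := if d = 0 then count1 - position else count1
    countDigitAllLoop d n (position * 10) (by omega) count2
  else count
termination_by (n + 1 - position).toNat
decreasing_by omega

def countDigitAll (d : Int) (n : Int) : Int :=
  if n < 0 then 0
  else countDigitAllLoop d n 1 (by norm_num) 0

-- ===== PORT B =====
-- inner 'while x > 0' of Source B's digits_count, accumulating into c
def countDigitAllAltPeel (d : Int) (x : Int) (total : Int) : Int :=
  if h : 0 < x then
    countDigitAllAltPeel d (PySem.Int.floordiv x 10)
      (if PySem.Int.mod x 10 = d then total + 1 else total)
  else total
termination_by x.toNat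
decreasing_by
  have : PySem.Int.floordiv x 10 = x / 10 := PySem.Int.floordiv_eq_ediv_of_pos (by norm_num)
  rw [this]
  omega

-- f(m) of Source B: self-similar recursion on m // 10
def countDigitAllAltF (d : Int) (m : Int) : Int :=
  if h : m ≤ 0 then 0
  else
    (PySem.Int.floordiv m 10 + (if d ≤ PySem.Int.mod m 10 then 1 else 0) - (if d = 0 then 1 else 0))
      + 10 * countDigitAllAltF d (PySem.Int.floordiv m 10)
      - (9 - PySem.Int.mod m 10) * countDigitAllAltPeel d (PySem.Int.floordiv m 10) 0
termination_by m.toNat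
decreasing_by
  have : PySem.Int.floordiv m 10 = m / 10 := PySem.Int.floordiv_eq_ediv_of_pos (by norm_num)
  rw [this]
  omega

def countDigitAll_alt (d : Int) (n : Int) : Int := countDigitAllAltF d n

-- ===== PRECONDITION & SPEC =====
def Spec_countDigitAll (d : Int) (n : Int) (out : Int) : Prop := out = countDigitAll_alt d n
instance (d : Int) (n : Int) (out : Int) : Decidable (Spec_countDigitAll d n out) := by unfold Spec_countDigitAll; infer_instance

-- ===== CLAIM (what is proved, stated in full; the proofs are below) =====
def Claim_equal_countDigitAll : Prop := ∀ (d : Int) (n : Int), Dom_countDigitAll d n → Spec_countDigitAll d n (countDigitAll d n)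

-- ===== LEMMAS AND PROOFS =====

-- occurrences of the value d among the decimal digits of m (proof-side mirror of digits_count)
def gcnt (d : Int) (m : Nat) : Int :=
  if h : 0 < m then (if ((m % 10 : Nat) : Int) = d then 1 else 0) + gcnt d (m / 10) else 0
termination_by m
decreasing_by omega

-- positions p, 10p, 100p, … of n whose digit equals d (A-side position-indexed digit counter)
def eqcLoop (d m p : Int) (hp : 1 ≤ p) : Int :=
  if h : p ≤ m then
    (if PySem.Int.mod (PySem.Int.floordiv m p) 10 = d then 1 else 0) + eqcLoop d m (p * 10) (by omega)
  else 0
termination_by (m + 1 - p).toNat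
decreasing_by omega

theorem loop_stop (d n p : Int) (hp : 1 ≤ p) (c : Int) (h : ¬ p ≤ n) :
    countDigitAllLoop d n p hp c = c := by
  rw [countDigitAllLoop, dif_neg h]

theorem eqc_stop (d m p : Int) (hp : 1 ≤ p) (h : ¬ p ≤ m) : eqcLoop d m p hp = 0 := by
  rw [eqcLoop, dif_neg h]

theorem peel_eq (d : Int) (m : Nat) : ∀ t : Int,
    countDigitAllAltPeel d (m : Int) t = t + gcnt d m := by
  induction m using Nat.strong_induction_on with
  | _ m ih =>
    intro t
    rw [countDigitAllAltPeel, gcnt]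
    by_cases hm : 0 < m
    · rw [dif_pos (by exact_mod_cast hm), dif_pos hm]
      have hf : PySem.Int.floordiv (m : Int) 10 = ((m / 10 : Nat) : Int) := by
        exact_mod_cast PySem.Int.floordiv_natCast m 10
      have hmod : PySem.Int.mod (m : Int) 10 = ((m % 10 : Nat) : Int) := by
        exact_mod_cast PySem.Int.mod_natCast m 10
      rw [hf, hmod, ih (m / 10) (by omega)]
      split_ifs <;> ring
    · rw [dif_neg (by exact_mod_cast hm), dif_neg hm]
      ring

theorem eqc_gcnt (d : Int) (M : Nat) :
    ∀ k : Nat, ∀ p : Int, ∀ hp : 1 ≤ p, M + 1 - p.toNat ≤ k →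
      eqcLoop d (M : Int) p hp = gcnt d (M / p.toNat) := by
  intro k
  induction k with
  | zero =>
    intro p hp hk
    rw [eqcLoop, dif_neg (by omega : ¬ p ≤ (M : Int))]
    rw [Nat.div_eq_of_lt (by omega), gcnt]
    simp
  | succ k ih =>
    intro p hp hk
    rw [eqcLoop]
    by_cases h : p ≤ (M : Int)
    · rw [dif_pos h]
      have hfd : PySem.Int.floordiv (M : Int) p = ((M / p.toNat : Nat) : Int) := by
        rw [show p = ((p.toNat : Nat) : Int) by omega]
        exact_mod_cast PySem.Int.floordiv_natCast M p.toNat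
      have hmod : PySem.Int.mod ((M / p.toNat : Nat) : Int) 10 = ((M / p.toNat % 10 : Nat) : Int) := by
        exact_mod_cast PySem.Int.mod_natCast (M / p.toNat) 10
      have hq : 0 < M / p.toNat := Nat.div_pos (by omega) (by omega)
      rw [hfd, hmod, ih (p * 10) (by omega) (by omega)]
      rw [show (p * 10).toNat = p.toNat * 10 by omega]
      conv_rhs => rw [gcnt, dif_pos hq]
      rw [Nat.div_div_eq_div_mul M p.toNat 10]
    · rw [dif_neg h]
      rw [Nat.div_eq_of_lt (by omega), gcnt]
      simp

-- the loop accumulates: its value is the accumulator plus its value from 0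
theorem loop_acc (d : Int) (N : Nat) :
    ∀ k : Nat, ∀ p : Int, ∀ hp : 1 ≤ p, ∀ c : Int, N + 1 - p.toNat ≤ k →
      countDigitAllLoop d (N : Int) p hp c = c + countDigitAllLoop d (N : Int) p hp 0 := by
  intro k
  induction k with
  | zero =>
    intro p hp c hk
    rw [loop_stop d (N : Int) p hp c (by omega), loop_stop d (N : Int) p hp 0 (by omega)]
    ring
  | succ k ih =>
    intro p hp c hk
    by_cases h : p ≤ (N : Int)
    · conv_lhs => rw [countDigitAllLoop]
      conv_rhs => rw [countDigitAllLoop]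
      rw [dif_pos h, dif_pos h]
      conv_lhs => rw [ih (p * 10) (by omega) _ (by omega)]
      conv_rhs => rw [ih (p * 10) (by omega) _ (by omega)]
      split_ifs <;> ring
    · rw [loop_stop d (N : Int) p hp c h, loop_stop d (N : Int) p hp 0 h]
      ring

-- decimal split of a Nat modulus: N mod (p*10) in terms of N/10 mod p and N mod 10
theorem modsplit (N P : Nat) (hP : 0 < P) :
    N % (P * 10) = 10 * (N / 10 % P) + N % 10 := by
  have e : N = (P * 10) * (N / 10 / P) + (10 * (N / 10 % P) + N % 10) := by
    have h1 := Nat.div_add_mod N 10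
    have h2 := Nat.div_add_mod (N / 10) P
    calc N = 10 * (N / 10) + N % 10 := by omega
    _ = 10 * (P * (N / 10 / P) + N / 10 % P) + N % 10 := by rw [h2]
    _ = (P * 10) * (N / 10 / P) + (10 * (N / 10 % P) + N % 10) := by ring
  have hlt : 10 * (N / 10 % P) + N % 10 < P * 10 := by
    have h3 : N / 10 % P < P := Nat.mod_lt _ hP
    have h4 : N % 10 < 10 := Nat.mod_lt _ (by norm_num)
    nlinarith
  conv_lhs => rw [e]
  rw [Nat.mul_add_mod, Nat.mod_eq_of_lt hlt]

-- position-shift lemma: A's loop over positions 10p, 100p, … of n equals 10 times its loop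
-- over positions p, 10p, … of n/10, corrected on the digit-d positions by 9 - n%10
theorem loop_shift (d : Int) (N : Nat) :
    ∀ k : Nat, ∀ p : Int, ∀ hp : 1 ≤ p, ∀ hp10 : 1 ≤ p * 10, ∀ c : Int, N / 10 + 1 - p.toNat ≤ k →
      countDigitAllLoop d (N : Int) (p * 10) hp10 c
        = c + 10 * countDigitAllLoop d ((N / 10 : Nat) : Int) p hp 0
          - (9 - ((N % 10 : Nat) : Int)) * eqcLoop d ((N / 10 : Nat) : Int) p hp := by
  intro k
  induction k with
  | zero =>
    intro p hp hp10 c hk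
    rw [loop_stop d (N : Int) (p * 10) hp10 c (by omega),
      loop_stop d ((N / 10 : Nat) : Int) p hp 0 (by omega),
      eqc_stop d ((N / 10 : Nat) : Int) p hp (by omega)]
    ring
  | succ k ih =>
    intro p hp hp10 c hk
    by_cases h : p ≤ ((N / 10 : Nat) : Int)
    · have h10 : p * 10 ≤ (N : Int) := by omega
      conv_lhs => rw [countDigitAllLoop]
      rw [dif_pos h10]
      conv_rhs => rw [countDigitAllLoop]
      rw [dif_pos h]
      rw [eqcLoop, dif_pos h]
      rw [loop_acc d (N / 10) (N / 10 + 1) (p * 10) (by omega) _ (by omega)]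
      rw [ih (p * 10) (by omega) (by omega) _ (by omega)]
      -- cast all PySem arithmetic to Nat form
      obtain ⟨P, rfl⟩ : ∃ P : Nat, p = (P : Int) := ⟨p.toNat, by omega⟩
      have hP : 0 < P := by exact_mod_cast hp
      have c1 : PySem.Int.floordiv (N : Int) ((P : Int) * 10 * 10) = ((N / (P * 100) : Nat) : Int) := by
        rw [show ((P : Int) * 10 * 10) = ((P * 100 : Nat) : Int) by push_cast; ring]
        exact_mod_cast PySem.Int.floordiv_natCast N (P * 100)
      have c2 : PySem.Int.floordiv (N : Int) ((P : Int) * 10) = ((N / (P * 10) : Nat) : Int) := by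
        rw [show ((P : Int) * 10) = ((P * 10 : Nat) : Int) by push_cast; ring]
        exact_mod_cast PySem.Int.floordiv_natCast N (P * 10)
      have c3 : PySem.Int.mod ((N / (P * 10) : Nat) : Int) 10 = ((N / (P * 10) % 10 : Nat) : Int) := by
        exact_mod_cast PySem.Int.mod_natCast (N / (P * 10)) 10
      have c4 : PySem.Int.mod (N : Int) ((P : Int) * 10) = ((N % (P * 10) : Nat) : Int) := by
        rw [show ((P : Int) * 10) = ((P * 10 : Nat) : Int) by push_cast; ring]
        exact_mod_cast PySem.Int.mod_natCast N (P * 10)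
      have c5 : PySem.Int.floordiv ((N / 10 : Nat) : Int) ((P : Int) * 10) = ((N / 10 / (P * 10) : Nat) : Int) := by
        rw [show ((P : Int) * 10) = ((P * 10 : Nat) : Int) by push_cast; ring]
        exact_mod_cast PySem.Int.floordiv_natCast (N / 10) (P * 10)
      have c6 : PySem.Int.floordiv ((N / 10 : Nat) : Int) (P : Int) = ((N / 10 / P : Nat) : Int) := by
        exact_mod_cast PySem.Int.floordiv_natCast (N / 10) P
      have c7 : PySem.Int.mod ((N / 10 / P : Nat) : Int) 10 = ((N / 10 / P % 10 : Nat) : Int) := by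
        exact_mod_cast PySem.Int.mod_natCast (N / 10 / P) 10
      have c8 : PySem.Int.mod ((N / 10 : Nat) : Int) (P : Int) = ((N / 10 % P : Nat) : Int) := by
        exact_mod_cast PySem.Int.mod_natCast (N / 10) P
      rw [c1, c2, c3, c4, c5, c6, c7, c8]
      -- identical digits and quotients on the two sides
      have d1 : N / 10 / (P * 10) = N / (P * 100) := by
        rw [Nat.div_div_eq_div_mul]
        congr 1
        ring
      have d2 : N / 10 / P = N / (P * 10) := by
        rw [Nat.div_div_eq_div_mul]
        congr 1
        ring
      have d3 : N % (P * 10) = 10 * (N / 10 % P) + N % 10 := modsplit N P hP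
      rw [d1, d2, d3]
      have h9 : N % 10 ≤ 9 := by omega
      split_ifs <;> (try (exfalso; linarith)) <;> push_cast <;> ring
    · rw [loop_stop d (N : Int) (p * 10) hp10 c (by omega),
        loop_stop d ((N / 10 : Nat) : Int) p hp 0 h,
        eqc_stop d ((N / 10 : Nat) : Int) p hp h]
      ring

-- both programs satisfy the same recursion on n // 10, hence agree on all n ≥ 0
theorem main_eq (d : Int) (N : Nat) : countDigitAll d (N : Int) = countDigitAllAltF d (N : Int) := by
  induction N using Nat.strong_induction_on with
  | _ N ih =>
    by_cases hN : N = 0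
    · subst hN
      rw [countDigitAll, if_neg (by norm_num),
        loop_stop d ((0 : Nat) : Int) 1 (by norm_num) 0 (by norm_num), countDigitAllAltF,
        dif_pos (by norm_num : ((0 : Nat) : Int) ≤ 0)]
    · rw [countDigitAll, if_neg (by omega)]
      conv_lhs => rw [countDigitAllLoop]
      rw [dif_pos (by omega : (1 : Int) ≤ (N : Int))]
      have h2 := fun c => loop_shift d N (N / 10 + 1) 1 (by norm_num) (by norm_num) c (by omega)
      simp only [one_mul] at h2 ⊢
      rw [h2]
      rw [countDigitAllAltF, dif_neg (by omega : ¬ (N : Int) ≤ 0)]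
      have c2' : PySem.Int.floordiv (N : Int) 10 = ((N / 10 : Nat) : Int) := by
        exact_mod_cast PySem.Int.floordiv_natCast N 10
      have c3 : PySem.Int.floordiv (N : Int) 1 = (N : Int) := by
        rw [PySem.Int.floordiv_eq_ediv_of_pos (by norm_num)]
        omega
      have c4 : PySem.Int.mod (N : Int) 10 = ((N % 10 : Nat) : Int) := by
        exact_mod_cast PySem.Int.mod_natCast N 10
      have c5 : PySem.Int.mod (N : Int) 1 = 0 := by
        rw [PySem.Int.mod_eq_emod_of_pos (by norm_num)]
        omega
      rw [c2', c3, c4, c5]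
      -- the inner loop from position 1 is A on N / 10; use the induction hypothesis
      have hA : countDigitAllLoop d ((N / 10 : Nat) : Int) 1 (by norm_num) 0
          = countDigitAll d ((N / 10 : Nat) : Int) := by
        rw [countDigitAll, if_neg (by omega)]
      rw [hA, ih (N / 10) (by omega)]
      -- the position counter from 1 is Source B's digits_count of N / 10
      have hE : eqcLoop d ((N / 10 : Nat) : Int) 1 (by norm_num)
          = countDigitAllAltPeel d ((N / 10 : Nat) : Int) 0 := by
        rw [eqc_gcnt d (N / 10) (N / 10 + 1) 1 (by norm_num) (by omega), peel_eq]
        norm_num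
      rw [hE]
      -- remaining: A's first-position contribution equals Source B's 'last'
      have h9 : N % 10 ≤ 9 := by omega
      split_ifs <;> push_cast <;> omega

-- ===== VERDICT (by name: the statement is the Claim_ definition above) =====
theorem countDigitAll_spec : Claim_equal_countDigitAll := by
  intro d n _
  unfold Spec_countDigitAll countDigitAll_alt
  by_cases hn : n < 0
  · rw [countDigitAll, if_pos hn, countDigitAllAltF, dif_pos (by omega)]
  · obtain ⟨N, rfl⟩ : ∃ N : Nat, n = (N : Int) := ⟨n.toNat, by omega⟩
    rw [main_eq]
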